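-- pv_equiv track=rewrite | github.com/yas19sin/QuadConnect | quadconnect.py | convert_moves_to_coordinate_list
-- ===== SOURCE A (Python) =====
-- from typing import List, Dict, Tuple
--
-- def convert_moves_to_coordinate_list(moves_list: List[str]) -> str:
--     """
--     Converts a list of moves to a coordinate list representation.
--     Each move is formatted as <column><row>(<piece>).
--     Returns "Empty" if no moves are present.
--     """
--     # Create an empty 6x7 grid (row 1 is at index 0)
--     grid = [['.' for _ in range(7)] for _ in range(6)]
--
--     for i, move in enumerate(moves_list):
--         if not move:
--             continue
--         col = ord(move[0]) - ord('a')
--         # Find the lowest available row in this column: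
--         for row in range(6):
--             if grid[row][col] == '.':
--                 grid[row][col] = 'X' if i % 2 == 0 else 'O'
--                 break
--
--     # Build coordinate list: Only include cells with a piece.
--     coords = []
--     for row in range(6):
--         for col in range(7):
--             if grid[row][col] != '.':
--                 # Convert row index to board row number (row 0 -> 1, etc.)
--                 coords.append(f"{chr(col + ord('a'))}{row+1}({grid[row][col]})")
--
--     return ", ".join(coords) if coords else "Empty Board"
-- ===== SOURCE B (Python) =====
-- from typing import List
--
-- def convert_moves_to_coordinate_list(moves_list: List[str]) -> str:
--     """
--     Same task as A, but instead of rescanning the column for the lowest empty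
--     cell, keep a per-column heights array: each placement is O(1).
--     """
--     grid = [['.'] * 7 for _ in range(6)]
--     heights = [0] * 7
--     for i, move in enumerate(moves_list):
--         if not move:
--             continue
--         col = ord(move[0]) - ord('a')
--         h = heights[col]
--         if h < 6:
--             grid[h][col] = 'X' if i % 2 == 0 else 'O'
--             heights[col] = h + 1
--     coords = [f"{chr(c + ord('a'))}{r + 1}({grid[r][c]})"
--               for r in range(6) for c in range(7) if grid[r][c] != '.']
--     return ", ".join(coords) if coords else "Empty Board"
-- ===== Notes on version B (the rewrite author's own statement) =====
-- stated objective: faster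
-- what changed: B maintains a per-column heights array so each move is placed in O(1) instead of rescanning the column grid cells for the lowest empty one, and builds the coordinate list with a comprehension instead of nested append loops.
import Mathlib
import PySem

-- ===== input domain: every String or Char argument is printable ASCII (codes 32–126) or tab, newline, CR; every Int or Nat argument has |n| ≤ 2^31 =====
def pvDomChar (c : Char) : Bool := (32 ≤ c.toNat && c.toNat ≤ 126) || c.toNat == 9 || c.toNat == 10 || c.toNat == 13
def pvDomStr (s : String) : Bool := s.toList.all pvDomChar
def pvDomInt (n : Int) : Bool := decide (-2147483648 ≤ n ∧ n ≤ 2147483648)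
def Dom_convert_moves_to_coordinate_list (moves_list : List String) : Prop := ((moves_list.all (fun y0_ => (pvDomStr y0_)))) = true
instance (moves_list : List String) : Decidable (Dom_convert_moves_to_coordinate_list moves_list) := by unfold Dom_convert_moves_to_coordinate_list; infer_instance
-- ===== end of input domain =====

-- B replaces A's per-move upward scan of the column by a per-column heights array (one O(1) placement per move).

-- shared formatting of one coordinate: f"{chr(col + ord('a'))}{row+1}({piece})"
def pvFmtCell (r c : Nat) (cell : Char) : String :=
  String.ofList (Char.ofNat (c + 97) :: (PySem.Int.toChars ((r : Int) + 1) ++ ('(' :: cell :: [')'])))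

-- ===== PORT A =====
-- inner loop: 'for row in range(6): if grid[row][col] == '.': grid[row][col] = piece; break'.
-- grid[row] (row ∈ range(6), grid always 6 rows) is read with getD; grid[row][col] uses PySem
-- pyGetD/pySetD: an out-of-range col, where Python raises IndexError, is excluded by Pre_.
def pvARows : List (List Char) → Int → Char → List Nat → List (List Char)
  | g, _, _, [] => g
  | g, col, piece, r :: rs =>
      if PySem.List.pyGetD (g.getD r []) col '?' = '.' then
        g.set r (PySem.List.pySetD (g.getD r []) col piece)
      else pvARows g col piece rs

def pvAStep (g : List (List Char)) (im : Int × String) : List (List Char) :=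
  if im.2 = "" then g else
    match PySem.Str.pyGet? im.2 0 with
    | none => g
    | some c =>
        pvARows g ((c.toNat : Int) - 97)
          (if PySem.Int.mod im.1 2 = 0 then 'X' else 'O') [0, 1, 2, 3, 4, 5]

def convert_moves_to_coordinate_list (moves_list : List String) : String :=
  let grid := (PySem.List.enumerate moves_list 0).foldl pvAStep
      (List.replicate 6 (List.replicate 7 '.'))
  -- nested append loops building coords
  let coords := (List.range 6).foldl (fun acc r =>
      (List.range 7).foldl (fun acc2 c =>
        if (grid.getD r []).getD c '.' ≠ '.' then
          acc2 ++ [pvFmtCell r c ((grid.getD r []).getD c '.')]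
        else acc2) acc) []
  if coords = [] then "Empty Board" else PySem.Str.join ", " coords

-- ===== PORT B =====
-- state = (grid, heights); heights[col] is the lowest free row of column col
def pvBStep (s : List (List Char) × List Int) (im : Int × String) :
    List (List Char) × List Int :=
  if im.2 = "" then s else
    match PySem.Str.pyGet? im.2 0 with
    | none => s
    | some c =>
        let col : Int := (c.toNat : Int) - 97
        let h := PySem.List.pyGetD s.2 col 6
        if h < 6 then
          (PySem.List.pySetD s.1 h
             (PySem.List.pySetD (PySem.List.pyGetD s.1 h []) col
               (if PySem.Int.mod im.1 2 = 0 then 'X' else 'O')),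
           PySem.List.pySetD s.2 col (h + 1))
        else s

def convert_moves_to_coordinate_list_alt (moves_list : List String) : String :=
  let st := (PySem.List.enumerate moves_list 0).foldl pvBStep
      (List.replicate 6 (List.replicate 7 '.'), List.replicate 7 0)
  -- list comprehension over (r, c)
  let coords := (List.range 6).flatMap (fun r =>
      (List.range 7).filterMap (fun c =>
        if (st.1.getD r []).getD c '.' = '.' then none
        else some (pvFmtCell r c ((st.1.getD r []).getD c '.'))))
  if coords = [] then "Empty Board" else PySem.Str.join ", " coords

-- ===== PRECONDITION & SPEC =====
-- Pre_ excludes exactly the inputs on which A raises IndexError: a non-empty move whose first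
-- character yields a column index outside [-7, 7) (first char code outside 90..103).
def Pre_convert_moves_to_coordinate_list (moves_list : List String) : Prop :=
  (moves_list.all (fun m => m.toList.head?.all
    (fun c => decide (90 ≤ c.toNat ∧ c.toNat ≤ 103)))) = true
instance (moves_list : List String) : Decidable (Pre_convert_moves_to_coordinate_list moves_list) := by
  unfold Pre_convert_moves_to_coordinate_list; infer_instance

def pvWitness_convert_moves_to_coordinate_list : List String := ["d1", "", "d2", "e1"]

def Spec_convert_moves_to_coordinate_list (moves_list : List String) (out : String) : Prop := out = convert_moves_to_coordinate_list_alt moves_list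
instance (moves_list : List String) (out : String) : Decidable (Spec_convert_moves_to_coordinate_list moves_list out) := by unfold Spec_convert_moves_to_coordinate_list; infer_instance

-- ===== CLAIM (what is proved, stated in full; the proofs are below) =====
def Claim_equal_convert_moves_to_coordinate_list : Prop := ∀ (moves_list : List String), Dom_convert_moves_to_coordinate_list moves_list → Pre_convert_moves_to_coordinate_list moves_list → Spec_convert_moves_to_coordinate_list moves_list (convert_moves_to_coordinate_list moves_list)

-- ===== LEMMAS AND PROOFS =====

-- resolved (wrapped) index of a column index col ∈ [-7, 7) into a length-7 list
def pvJ (col : Int) : Nat := if col < 0 then (col + 7).toNat else col.toNat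

theorem pvJ_lt (col : Int) (h1 : -7 ≤ col) (h2 : col < 7) : pvJ col < 7 := by
  unfold pvJ; split <;> omega

theorem pyGetD7 {α : Type} (xs : List α) (col : Int) (d : α) (hl : xs.length = 7)
    (h1 : -7 ≤ col) (h2 : col < 7) :
    PySem.List.pyGetD xs col d = xs.getD (pvJ col) d := by
  simp only [PySem.List.pyGetD, PySem.List.pyGet?, PySem.List.pyIdx?, hl, pvJ]
  split_ifs <;> simp_all <;> first | omega | (congr 1; omega)

theorem pySetD7 {α : Type} (xs : List α) (col : Int) (v : α) (hl : xs.length = 7)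
    (h1 : -7 ≤ col) (h2 : col < 7) :
    PySem.List.pySetD xs col v = xs.set (pvJ col) v := by
  simp only [PySem.List.pySetD, PySem.List.pySet?, PySem.List.pyIdx?, hl, pvJ]
  split_ifs <;> simp_all <;> first | omega | (congr 1; omega)

-- the invariant tying B's heights array to the grid
def pvInv (g : List (List Char)) (hts : List Int) : Prop :=
  g.length = 6 ∧ hts.length = 7 ∧ (∀ r < 6, (g.getD r []).length = 7) ∧
  ∀ j < 7, 0 ≤ hts.getD j 0 ∧ hts.getD j 0 ≤ 6 ∧
    ∀ r < 6, ((g.getD r []).getD j '?' = '.' ↔ hts.getD j 0 ≤ (r : Int))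

theorem pvInv_init :
    pvInv (List.replicate 6 (List.replicate 7 '.')) (List.replicate 7 0) := by
  unfold pvInv
  refine ⟨by decide, by decide, by decide, by decide⟩

theorem pvGetD_set {α : Type} (g : List α) (k r : Nat) (v d : α) (hk : k < g.length) :
    (g.set k v).getD r d = if r = k then v else g.getD r d := by
  by_cases hr : r < g.length
  · rw [List.getD_eq_getElem _ _ (by simpa using hr), List.getElem_set]
    split_ifs with h1 h2 h3 <;> first
      | rfl | omega | (rw [List.getD_eq_getElem _ _ hr])
  · rw [if_neg (by omega)]
    rw [List.getD_eq_getElem?_getD, List.getD_eq_getElem?_getD,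
      List.getElem?_eq_none (by simpa using (by omega : g.length ≤ r)),
      List.getElem?_eq_none (by omega)]

-- A's column scan, characterised through the invariant
theorem pvARows_eq (g : List (List Char)) (hts : List Int) (col : Int) (piece : Char)
    (hinv : pvInv g hts) (h1 : -7 ≤ col) (h2 : col < 7) :
    pvARows g col piece [0, 1, 2, 3, 4, 5] =
      if hts.getD (pvJ col) 0 < 6 then
        g.set (hts.getD (pvJ col) 0).toNat
          ((g.getD (hts.getD (pvJ col) 0).toNat []).set (pvJ col) piece)
      else g := by
  obtain ⟨hg, hh, hrow, hcols⟩ := hinv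
  have hj := pvJ_lt col h1 h2
  obtain ⟨hk0, hk6, hcell⟩ := hcols (pvJ col) hj
  obtain ⟨kn, hkeq, hkn7⟩ : ∃ n : Nat, hts.getD (pvJ col) 0 = (n : Int) ∧ n < 7 :=
    ⟨(hts.getD (pvJ col) 0).toNat, by omega, by omega⟩
  rw [hkeq] at hcell ⊢
  have hget : ∀ r : Nat, r < 6 →
      PySem.List.pyGetD (g.getD r []) col '?' = (g.getD r []).getD (pvJ col) '?' :=
    fun r hr => pyGetD7 _ _ _ (hrow r hr) h1 h2
  have hset : ∀ r : Nat, r < 6 →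
      PySem.List.pySetD (g.getD r []) col piece = (g.getD r []).set (pvJ col) piece :=
    fun r hr => pySetD7 _ _ _ (hrow r hr) h1 h2
  have hne : ∀ r : Nat, r < 6 → r < kn → ¬ ((g.getD r []).getD (pvJ col) '?' = '.') := by
    intro r hr hrk h
    have := (hcell r hr).mp h; omega
  have heq : ∀ r : Nat, r < 6 → r = kn → (g.getD r []).getD (pvJ col) '?' = '.' := by
    intro r hr hrk; exact (hcell r hr).mpr (by omega)
  simp only [pvARows, hget 0 (by omega), hget 1 (by omega), hget 2 (by omega),
    hget 3 (by omega), hget 4 (by omega), hget 5 (by omega)]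
  interval_cases kn <;>
    simp_all [hne 0, hne 1, hne 2, hne 3, hne 4, hne 5,
      hset 0 (by omega), hset 1 (by omega), hset 2 (by omega),
      hset 3 (by omega), hset 4 (by omega), hset 5 (by omega)]

theorem pvStep_eq (g : List (List Char)) (hts : List Int) (im : Int × String)
    (hinv : pvInv g hts)
    (hpre : ∀ c, im.2.toList.head? = some c → 90 ≤ c.toNat ∧ c.toNat ≤ 103) :
    pvAStep g im = (pvBStep (g, hts) im).1 ∧
      pvInv (pvBStep (g, hts) im).1 (pvBStep (g, hts) im).2 := by
  obtain ⟨i, m⟩ := im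
  by_cases hm : m = ""
  · simp [pvAStep, pvBStep, hm, hinv]
  · have htl : m.toList ≠ [] := by
      intro h; apply hm
      simpa using congrArg String.ofList h
    obtain ⟨c, t, hct⟩ : ∃ c t, m.toList = c :: t := by
      cases h : m.toList with
      | nil => exact absurd h htl
      | cons a b => exact ⟨a, b, rfl⟩
    have hcget : PySem.Str.pyGet? m 0 = some c := by
      rw [PySem.Str.pyGet?_eq, hct]
      show PySem.List.pyGet? (c :: t) 0 = some c
      exact PySem.List.pyGet?_zero_cons c t
    obtain ⟨hc1, hc2⟩ := hpre c (by rw [hct]; rfl)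
    set piece := (if PySem.Int.mod i 2 = 0 then 'X' else 'O') with hpiece
    have hpd : piece ≠ '.' := by rw [hpiece]; split <;> decide
    set col : Int := (c.toNat : Int) - 97 with hcol
    have h1 : -7 ≤ col := by omega
    have h2 : col < 7 := by omega
    obtain ⟨hg, hh, hrow, hcols⟩ := hinv
    have hj := pvJ_lt col h1 h2
    have hhts : PySem.List.pyGetD hts col 6 = hts.getD (pvJ col) 0 := by
      rw [pyGetD7 _ _ _ hh h1 h2]
      rw [List.getD_eq_getElem _ _ (by omega), List.getD_eq_getElem _ _ (by omega)]
    obtain ⟨hk0, hk6, hcell⟩ := hcols (pvJ col) hj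
    have hA := pvARows_eq g hts col piece ⟨hg, hh, hrow, hcols⟩ h1 h2
    simp only [pvAStep, pvBStep, if_neg hm, hcget, hhts, ← hcol, ← hpiece]
    by_cases hlt : hts.getD (pvJ col) 0 < 6
    · rw [if_pos hlt] at hA ⊢
      set k : Nat := (hts.getD (pvJ col) 0).toNat with hkdef
      have hkc : hts.getD (pvJ col) 0 = (k : Int) := by omega
      have hk6' : k < 6 := by omega
      have hBg : PySem.List.pySetD g (hts.getD (pvJ col) 0)
            (PySem.List.pySetD (PySem.List.pyGetD g (hts.getD (pvJ col) 0) []) col piece) =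
          g.set k ((g.getD k []).set (pvJ col) piece) := by
        rw [hkc]
        simp only [PySem.List.pyGetD_natCast, PySem.List.pySetD_natCast]
        rw [pySetD7 _ _ _ (hrow k hk6') h1 h2]
      constructor
      · rw [hA, hBg]
      · -- invariant for the new state
        rw [hBg, pySetD7 _ _ _ hh h1 h2]
        refine ⟨by simp [hg], by simp [hh], ?_, ?_⟩
        · intro r hr
          rw [pvGetD_set _ _ _ _ _ (by omega)]
          split_ifs with hrk
          · subst hrk; rw [List.length_set]; exact hrow k hk6'
          · exact hrow r hr
        · intro j' hj'
          have hhts' : ((hts.set (pvJ col) (hts.getD (pvJ col) 0 + 1)).getD j' 0) =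
              if j' = pvJ col then hts.getD (pvJ col) 0 + 1 else hts.getD j' 0 :=
            pvGetD_set _ _ _ _ _ (by omega)
          obtain ⟨hk0', hk6'', hcell'⟩ := hcols j' hj'
          refine ⟨?_, ?_, ?_⟩
          · rw [hhts']; split_ifs <;> omega
          · rw [hhts']; split_ifs <;> omega
          · intro r hr
            rw [hhts', pvGetD_set _ _ _ _ _ (by omega)]
            split_ifs with hrk hjj hjj
            · subst hrk; subst hjj
              rw [pvGetD_set _ _ _ _ _ (by rw [hrow k hk6']; omega)]
              rw [if_pos rfl]
              constructor
              · intro h; exact absurd h hpd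
              · intro h; omega
            · subst hrk
              rw [pvGetD_set _ _ _ _ _ (by rw [hrow k hk6']; omega)]
              rw [if_neg (fun h => hjj h)]
              exact hcell' k hk6'
            · subst hjj
              have := hcell r hr
              constructor
              · intro h; have := this.mp h; omega
              · intro h
                exact this.mpr (by omega)
            · exact hcell' r hr
    · rw [if_neg hlt] at hA ⊢
      exact ⟨hA, ⟨hg, hh, hrow, hcols⟩⟩

theorem pvFold_eq (ms : List String) (i : Int) (g : List (List Char)) (hts : List Int)
    (hinv : pvInv g hts)
    (hpre : ∀ m ∈ ms, ∀ c, m.toList.head? = some c → 90 ≤ c.toNat ∧ c.toNat ≤ 103) :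
    (PySem.List.enumerate ms i).foldl pvAStep g =
      ((PySem.List.enumerate ms i).foldl pvBStep (g, hts)).1 := by
  induction ms generalizing i g hts with
  | nil => simp [PySem.List.enumerate_nil]
  | cons m t ih =>
      rw [PySem.List.enumerate_cons]
      simp only [List.foldl_cons]
      obtain ⟨heq, hinv'⟩ := pvStep_eq g hts (i, m) hinv (fun c hc => hpre m (by simp) c hc)
      rw [heq]
      exact ih (i + 1) (pvBStep (g, hts) (i, m)).1 (pvBStep (g, hts) (i, m)).2 hinv'
        (fun m' hm' => hpre m' (by simp [hm']))

-- A's 'if p: out.append(f(x))' loop as a filterMap (Prop condition, so PySem.List.foldl_append_if does not apply verbatim)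
theorem pvFoldFM {α β : Type} (P : α → Prop) [DecidablePred P] (F : α → β)
    (l : List α) (acc : List β) :
    l.foldl (fun a x => if P x then a ++ [F x] else a) acc =
      acc ++ l.filterMap (fun x => if P x then some (F x) else none) := by
  induction l generalizing acc with
  | nil => simp
  | cons x t ih =>
      simp only [List.foldl_cons, List.filterMap_cons]
      split_ifs with h <;> simp [ih]

theorem pvSweep_eq (g : List (List Char)) :
    (List.range 6).foldl (fun acc r => (List.range 7).foldl (fun acc2 c =>
        if (g.getD r []).getD c '.' ≠ '.' then
          acc2 ++ [pvFmtCell r c ((g.getD r []).getD c '.')]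
        else acc2) acc) ([] : List String)
    = (List.range 6).flatMap (fun r => (List.range 7).filterMap (fun c =>
        if (g.getD r []).getD c '.' = '.' then none
        else some (pvFmtCell r c ((g.getD r []).getD c '.')))) := by
  have h1 : (fun (acc : List String) r => (List.range 7).foldl (fun acc2 c =>
        if (g.getD r []).getD c '.' ≠ '.' then
          acc2 ++ [pvFmtCell r c ((g.getD r []).getD c '.')]
        else acc2) acc)
      = fun acc r => acc ++ (List.range 7).filterMap (fun c =>
        if (g.getD r []).getD c '.' = '.' then none
        else some (pvFmtCell r c ((g.getD r []).getD c '.')))  := by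
    funext acc r
    rw [pvFoldFM (fun c => (g.getD r []).getD c '.' ≠ '.')
      (fun c => pvFmtCell r c ((g.getD r []).getD c '.'))]
    have hfun : (fun x => if (g.getD r []).getD x '.' ≠ '.' then
          some (pvFmtCell r x ((g.getD r []).getD x '.')) else none)
        = (fun c => if (g.getD r []).getD c '.' = '.' then none
          else some (pvFmtCell r c ((g.getD r []).getD c '.'))) := by
      funext cc
      by_cases h : (g.getD r []).getD cc '.' = '.' <;> simp [h]
    rw [hfun]
  rw [h1, PySem.List.foldl_append_eq_flatMap]
  simp

-- ===== VERDICT (by name: the statement is the Claim_ definition above) =====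
theorem convert_moves_to_coordinate_list_spec : Claim_equal_convert_moves_to_coordinate_list := by
  intro ms _ hpre
  have hpre' : ∀ m ∈ ms, ∀ c, m.toList.head? = some c → 90 ≤ c.toNat ∧ c.toNat ≤ 103 := by
    intro m hm c hc
    have := List.all_eq_true.mp hpre m hm
    rw [hc] at this
    simpa using this
  unfold Spec_convert_moves_to_coordinate_list
  simp only [convert_moves_to_coordinate_list, convert_moves_to_coordinate_list_alt]
  rw [pvFold_eq ms 0 _ _ pvInv_init hpre', pvSweep_eq]
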